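-- pv_equiv track=rewrite | github.com/TheoCtl/TennisGM | src/main_tk.py | _get_round_names
-- ===== SOURCE A (Python) =====
-- def _get_round_names(num_rounds):
--     """Generate round names based on number of rounds"""
--     if num_rounds == 1:
--         return ["Final"]
--     elif num_rounds == 2:
--         return ["Semifinals", "Final"]
--     elif num_rounds == 3:
--         return ["Quarterfinals", "Semifinals", "Final"]
--     elif num_rounds == 4:
--         return ["1st Round", "Quarterfinals", "Semifinals", "Final"]
--     elif num_rounds == 5:
--         return ["1st Round", "2nd Round", "Quarterfinals", "Semifinals", "Final"]
--     elif num_rounds == 6: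
--         return ["1st Round", "2nd Round", "3rd Round", "Quarterfinals", "Semifinals", "Final"]
--     elif num_rounds == 7:
--         return ["1st Round", "2nd Round", "3rd Round", "4th Round", "Quarterfinals", "Semifinals", "Final"]
--     else:
--         # For very large tournaments, use generic round names
--         names = []
--         for i in range(num_rounds):
--             if i == num_rounds - 1:
--                 names.append("Final")
--             elif i == num_rounds - 2:
--                 names.append("Semifinals")
--             elif i == num_rounds - 3:
--                 names.append("Quarterfinals")
--             else:
--                 names.append(f"Round {i + 1}")
--         return names
-- ===== SOURCE B (Python) =====
-- def _get_round_names(num_rounds):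
--     """Generate round names based on number of rounds"""
--     suffix = ["Quarterfinals", "Semifinals", "Final"]
--     if num_rounds <= 3:
--         return suffix[3 - num_rounds:]
--     early = num_rounds - 3
--     if num_rounds <= 7:
--         prefix = [f"{o} Round" for o in ["1st", "2nd", "3rd", "4th"][:early]]
--     else:
--         prefix = [f"Round {i + 1}" for i in range(early)]
--     return prefix + suffix
-- ===== Notes on version B (the rewrite author's own statement) =====
-- stated objective: simpler
-- what changed: Replaced the seven-branch case ladder plus a per-index if/elif loop by slicing a fixed three-name suffix and deriving the early-round prefix (ordinal table for <=7, comprehension otherwise).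
import Mathlib
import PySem

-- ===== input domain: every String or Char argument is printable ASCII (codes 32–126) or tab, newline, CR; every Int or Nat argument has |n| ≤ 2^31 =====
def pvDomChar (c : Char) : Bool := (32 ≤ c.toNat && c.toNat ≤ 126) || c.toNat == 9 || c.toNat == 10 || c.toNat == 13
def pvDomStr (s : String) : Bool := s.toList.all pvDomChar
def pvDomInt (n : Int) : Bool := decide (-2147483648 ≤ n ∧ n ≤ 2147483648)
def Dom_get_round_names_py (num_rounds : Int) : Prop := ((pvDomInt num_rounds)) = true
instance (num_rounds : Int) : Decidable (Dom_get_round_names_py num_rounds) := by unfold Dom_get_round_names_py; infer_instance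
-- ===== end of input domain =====

-- B replaces A's seven-branch case ladder and per-index if/elif loop by a sliced fixed suffix
-- plus a derived early-round prefix (objective: simpler).

-- ===== PORT A =====
def get_round_names_py (num_rounds : Int) : List String :=
  if num_rounds = 1 then ["Final"]
  else if num_rounds = 2 then ["Semifinals", "Final"]
  else if num_rounds = 3 then ["Quarterfinals", "Semifinals", "Final"]
  else if num_rounds = 4 then ["1st Round", "Quarterfinals", "Semifinals", "Final"]
  else if num_rounds = 5 then ["1st Round", "2nd Round", "Quarterfinals", "Semifinals", "Final"]
  else if num_rounds = 6 then ["1st Round", "2nd Round", "3rd Round", "Quarterfinals", "Semifinals", "Final"]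
  else if num_rounds = 7 then ["1st Round", "2nd Round", "3rd Round", "4th Round", "Quarterfinals", "Semifinals", "Final"]
  else
    (PySem.List.pyRange 0 num_rounds 1).foldl (fun names i =>
      if i = num_rounds - 1 then names ++ ["Final"]
      else if i = num_rounds - 2 then names ++ ["Semifinals"]
      else if i = num_rounds - 3 then names ++ ["Quarterfinals"]
      else names ++ ["Round " ++ PySem.Int.toStr (i + 1)]) []

-- ===== PORT B =====
def get_round_names_py_alt (num_rounds : Int) : List String :=
  let suffix : List String := ["Quarterfinals", "Semifinals", "Final"]
  if num_rounds ≤ 3 then PySem.List.slice suffix (some (3 - num_rounds)) none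
  else
    let early := num_rounds - 3
    let prefixNames :=
      if num_rounds ≤ 7 then
        (PySem.List.slice ["1st", "2nd", "3rd", "4th"] none (some early)).map (fun o => o ++ " Round")
      else
        (PySem.List.pyRange 0 early 1).map (fun i => "Round " ++ PySem.Int.toStr (i + 1))
    prefixNames ++ suffix

-- ===== PRECONDITION & SPEC =====
def Spec_get_round_names_py (num_rounds : Int) (out : List String) : Prop := out = get_round_names_py_alt num_rounds
instance (num_rounds : Int) (out : List String) : Decidable (Spec_get_round_names_py num_rounds out) := by unfold Spec_get_round_names_py; infer_instance

-- ===== CLAIM (what is proved, stated in full; the proofs are below) =====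
def Claim_equal_get_round_names_py : Prop := ∀ (num_rounds : Int), Dom_get_round_names_py num_rounds → Spec_get_round_names_py num_rounds (get_round_names_py num_rounds)

-- ===== LEMMAS AND PROOFS =====

-- A's loop as a map over the index range
theorem pvA_big (n : Int) (h8 : 8 ≤ n) :
    get_round_names_py n =
      (PySem.List.pyRange 0 n 1).map (fun i =>
        if i = n - 1 then "Final"
        else if i = n - 2 then "Semifinals"
        else if i = n - 3 then "Quarterfinals"
        else "Round " ++ PySem.Int.toStr (i + 1)) := by
  unfold get_round_names_py
  rw [if_neg (by omega), if_neg (by omega), if_neg (by omega), if_neg (by omega),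
      if_neg (by omega), if_neg (by omega), if_neg (by omega)]
  have hfun : (fun (names : List String) (i : Int) =>
      if i = n - 1 then names ++ ["Final"]
      else if i = n - 2 then names ++ ["Semifinals"]
      else if i = n - 3 then names ++ ["Quarterfinals"]
      else names ++ ["Round " ++ PySem.Int.toStr (i + 1)]) =
      (fun names i => names ++ [if i = n - 1 then "Final"
        else if i = n - 2 then "Semifinals"
        else if i = n - 3 then "Quarterfinals"
        else "Round " ++ PySem.Int.toStr (i + 1)]) := by
    funext names i; split_ifs <;> rfl
  rw [hfun, PySem.List.foldl_append_singleton_eq_map]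
  rfl

theorem pvRange_split (n : Int) (h8 : 8 ≤ n) :
    PySem.List.pyRange 0 n 1 = PySem.List.pyRange 0 (n - 3) 1 ++ [n - 3, n - 2, n - 1] := by
  rw [PySem.List.pyRange_one_append 0 (n - 3) n (by omega) (by omega)]
  congr 1
  rw [PySem.List.pyRange_one_cons (by omega), PySem.List.pyRange_one_cons (by omega),
      PySem.List.pyRange_one_cons (by omega), PySem.List.pyRange_one_eq_nil (by omega)]
  norm_num
  omega

-- ===== VERDICT (by name: the statement is the Claim_ definition above) =====
theorem get_round_names_py_spec : Claim_equal_get_round_names_py := by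
  intro n _
  unfold Spec_get_round_names_py
  by_cases h0 : n ≤ 0
  · -- n ≤ 0 : A's loop runs zero times; B slices past the end of the suffix
    unfold get_round_names_py get_round_names_py_alt
    rw [if_neg (by omega), if_neg (by omega), if_neg (by omega), if_neg (by omega),
        if_neg (by omega), if_neg (by omega), if_neg (by omega),
        PySem.List.pyRange_one_eq_nil (by omega)]
    simp only [List.foldl_nil]
    rw [if_pos (by omega), PySem.List.slice_from _ (by omega)]
    rw [List.drop_eq_nil_of_le (by simp; omega)]
  · by_cases h7 : n ≤ 7
    · interval_cases n <;> decide
    · -- n ≥ 8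
      rw [pvA_big n (by omega), pvRange_split n (by omega), List.map_append]
      unfold get_round_names_py_alt
      rw [if_neg (by omega)]
      simp only [if_neg (by omega : ¬ n ≤ 7)]
      congr 1
      · apply List.map_congr_left
        intro i hi
        rw [PySem.List.mem_pyRange_one] at hi
        rw [if_neg (by omega), if_neg (by omega), if_neg (by omega)]
      · simp only [List.map_cons, List.map_nil]
        rw [if_neg (show ¬(n-3 = n-1) by omega), if_neg (show ¬(n-3 = n-2) by omega),
            if_neg (show ¬(n-2 = n-1) by omega)]
        simp
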